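-- pv_equiv track=rewrite | github.com/dev-scof/Algorithm | programmers_algorithm/python/2018 KAKAO BLIND RECRUITMENT/[3]차 n진수 게임.py | solution
-- ===== SOURCE A (Python) =====
-- def ex(r):
--     if r == 10:
--         return 'A'
--     elif r == 11:
--         return 'B'
--     elif r == 12:
--         return 'C'
--     elif r == 13:
--         return 'D'
--     elif r == 14:
--         return 'E'
--     elif r == 15:
--         return 'F'
--     else:
--         return str(r)
--
-- def notation(num, n):
--     temp = []
--     q, r = divmod(num, n)
--     temp.append(ex(r))
--     while q > 0:
--         q, r = divmod(q, n)
--         temp.append(ex(r))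
--     return temp
--
-- def solution(n, t, m, p):
--     answer = ''
--     num=0
--     ba_list = []
--     cur_p = 0
--     p-=1
--     while len(answer) < t:
--         if ba_list == []: # 리스트가 비어있으면
--             ba_list = notation(num, n)
--             num+=1
--         if cur_p%m == p: # 순서이면
--             answer+=ba_list.pop()
--         else:
--             ba_list.pop()
--         cur_p+=1 # 순서 더하기
--     return answer
-- ===== SOURCE B (Python) =====
-- def solution(n, t, m, p):
--     # Build the base-n digit stream of 0,1,2,... up front, then index the
--     # player's positions directly, instead of simulating the turn-taking game.
--     if t <= 0:
--         return ''
--     DIGITS = "0123456789ABCDEF"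
--
--     def rep(num):
--         if num == 0:
--             return "0"
--         out = ""
--         while num > 0:
--             out = DIGITS[num % n] + out
--             num //= n
--         return out
--
--     need = p - 1 + (t - 1) * m + 1
--     parts = []
--     total = 0
--     num = 0
--     while total < need:
--         r = rep(num)
--         parts.append(r)
--         total += len(r)
--         num += 1
--     s = "".join(parts)
--     return "".join(s[p - 1 + k * m] for k in range(t))
-- ===== Notes on version B (the rewrite author's own statement) =====
-- stated objective: alternative
-- what changed: Instead of simulating the turn-taking game token by token (refilling and popping a reversed-digit list while counting turns modulo m), B builds the base-n digit stream of 0,1,2,... as one joined string just long enough and then reads the player's t characters directly at positions p-1+k*m.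
-- outside the precondition, e.g. on solution(17, 20, 1, 1): A returns '0123456789ABCDEF1610', B raises IndexError; on solution(2, 2, -2, 1): A returns '01', B raises IndexError
import Mathlib
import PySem

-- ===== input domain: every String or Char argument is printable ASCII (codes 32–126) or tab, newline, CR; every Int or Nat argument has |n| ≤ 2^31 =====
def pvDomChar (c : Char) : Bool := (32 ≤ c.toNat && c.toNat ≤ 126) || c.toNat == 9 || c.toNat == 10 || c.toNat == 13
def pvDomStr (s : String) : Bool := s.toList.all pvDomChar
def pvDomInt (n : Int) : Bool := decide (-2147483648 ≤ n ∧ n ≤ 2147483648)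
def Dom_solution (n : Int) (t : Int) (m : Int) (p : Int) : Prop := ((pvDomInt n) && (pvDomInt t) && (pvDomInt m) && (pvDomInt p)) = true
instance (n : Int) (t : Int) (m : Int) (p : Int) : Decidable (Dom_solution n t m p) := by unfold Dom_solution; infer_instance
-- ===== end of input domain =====

-- B replaces A's token-by-token turn-taking simulation by building the base-n digit
-- stream as one string and indexing the player's t positions directly (a different
-- algorithm of the same cost). Equivalence is about the return value.

-- ===== PORT A =====
-- the answer string is carried as its list of characters (PySem convention); tokens stay Strings as in A
def exA (r : Int) : String :=
  if r = 10 then "A"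
  else if r = 11 then "B"
  else if r = 12 then "C"
  else if r = 13 then "D"
  else if r = 14 then "E"
  else if r = 15 then "F"
  else PySem.Int.toStr r

-- the 'while q > 0' loop of notation; fuel bounds the iteration count (proved sufficient under Pre_)
def notationLoop (n : Int) (fuel : Nat) (q : Int) (temp : List String) : List String :=
  match fuel with
  | 0 => temp
  | fuel + 1 =>
    if q > 0 then
      notationLoop n fuel (PySem.Int.floordiv q n) (temp ++ [exA (PySem.Int.mod q n)])
    else temp

def notationA (num n : Int) : List String :=
  notationLoop n (num.natAbs + 1) (PySem.Int.floordiv num n)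
    [exA (PySem.Int.mod num n)]

-- the 'while len(answer) < t' loop; one fuel unit per iteration (sufficient under Pre_)
def loopA (n t m p1 : Int) (fuel : Nat) (answer : List Char) (num : Int)
    (ba : List String) (cur : Int) : List Char :=
  match fuel with
  | 0 => answer
  | fuel + 1 =>
    if (answer.length : Int) < t then
      let st := if ba = [] then (notationA num n, num + 1) else (ba, num)
      match PySem.List.pop? st.1 (-1) with
      | some (tok, ba') =>
        if PySem.Int.mod cur m = p1 then
          loopA n t m p1 fuel (answer ++ tok.toList) st.2 ba' (cur + 1)
        else
          loopA n t m p1 fuel answer st.2 ba' (cur + 1)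
      | none => answer
    else answer

def solution (n : Int) (t : Int) (m : Int) (p : Int) : String :=
  String.ofList (loopA n t m (p - 1) ((t * m).natAbs + 1) [] 0 [] 0)

-- ===== PORT B =====
def bDigits : List Char :=
  ['0', '1', '2', '3', '4', '5', '6', '7', '8', '9', 'A', 'B', 'C', 'D', 'E', 'F']

-- the 'while num > 0' loop of rep; fuel bounds the iteration count (sufficient under Pre_)
def repLoop (n : Int) (fuel : Nat) (num : Int) (out : List Char) : List Char :=
  match fuel with
  | 0 => out
  | fuel + 1 =>
    if num > 0 then
      repLoop n fuel (PySem.Int.floordiv num n)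
        (PySem.List.pyGetD bDigits (PySem.Int.mod num n) '?' :: out)
    else out

def repB (n num : Int) : List Char :=
  if num = 0 then ['0'] else repLoop n (num.natAbs + 1) num []

-- the 'while total < need' loop; one fuel unit per appended number (sufficient under Pre_)
def buildB (n need : Int) (fuel : Nat) (parts : List (List Char)) (total num : Int) :
    List (List Char) :=
  match fuel with
  | 0 => parts
  | fuel + 1 =>
    if total < need then
      let r := repB n num
      buildB n need fuel (parts ++ [r]) (total + r.length) (num + 1)
    else parts

def solution_alt (n : Int) (t : Int) (m : Int) (p : Int) : String :=
  if t ≤ 0 then "" else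
  let need := p - 1 + (t - 1) * m + 1
  let s := (buildB n need (need.natAbs + 1) [] 0 0).flatten
  String.ofList ((PySem.List.pyRange 0 t 1).map
    (fun k => PySem.List.pyGetD s (p - 1 + k * m) '?'))

-- ===== PRECONDITION & SPEC =====
-- Pre_ keeps the problem's own domain (and all t ≤ 0, where A returns '' at once): it excludes
-- m = 0 / n = 0 (A raises ZeroDivisionError), n = 1, m < 0 with p ≠ 1, and p outside 1..m
-- (A's while loop never terminates), n > 16 (A's ex() emits multi-character tokens there, so its
-- char-vs-token counting is accidental and B's base-≤16 digit table raises IndexError), and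
-- m < 0 with p = 1 (A terminates only by the divisor-sign accident of Python's %; B raises there).
def Pre_solution (n : Int) (t : Int) (m : Int) (p : Int) : Prop :=
  t ≤ 0 ∨ (2 ≤ n ∧ n ≤ 16 ∧ 1 ≤ m ∧ 1 ≤ p ∧ p ≤ m)
instance (n : Int) (t : Int) (m : Int) (p : Int) : Decidable (Pre_solution n t m p) := by
  unfold Pre_solution; infer_instance

def pvWitness_solution : Int × Int × Int × Int := (2, 4, 2, 1)

def Spec_solution (n : Int) (t : Int) (m : Int) (p : Int) (out : String) : Prop :=
  out = solution_alt n t m p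
instance (n : Int) (t : Int) (m : Int) (p : Int) (out : String) :
    Decidable (Spec_solution n t m p out) := by unfold Spec_solution; infer_instance

-- ===== CLAIM (what is proved, stated in full; the proofs are below) =====
def Claim_equal_solution : Prop :=
  ∀ (n : Int) (t : Int) (m : Int) (p : Int),
    Dom_solution n t m p → Pre_solution n t m p → Spec_solution n t m p (solution n t m p)

-- ===== LEMMAS AND PROOFS =====

-- the mathematical base-n representation (msb first) both ports compute
def dchar (x : Nat) : Char := bDigits.getD x '?'

def digRep (n x : Nat) : List Char :=
  if _ : n ≤ 1 then ['?']
  else if _ : x < n then [dchar x]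
  else digRep n (x / n) ++ [dchar (x % n)]
termination_by x
decreasing_by exact Nat.div_lt_self (by omega) (by omega)

-- the concatenated digit stream of 0,1,…,N-1 and its i-th character
def streamN (n N : Nat) : List Char := (List.range N).flatMap (digRep n)

def chS (n i : Nat) : Char := (streamN n (i + 1)).getD i '?'


-- basic facts about digRep / streamN / chS
lemma digRep_ne_nil (n x : Nat) : digRep n x ≠ [] := by
  rw [digRep]; split_ifs <;> simp

lemma streamN_succ (n N : Nat) : streamN n (N + 1) = streamN n N ++ digRep n N := by
  simp [streamN, List.range_succ]

lemma le_length_streamN (n N : Nat) : N ≤ (streamN n N).length := by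
  induction N with
  | zero => simp [streamN]
  | succ N ih =>
    rw [streamN_succ]
    have := List.length_pos_iff.mpr (digRep_ne_nil n N)
    simp only [List.length_append]; omega

lemma streamN_prefix (n : Nat) {N M : Nat} (h : N ≤ M) :
    streamN n N <+: streamN n M := by
  induction M with
  | zero => have : N = 0 := by omega
            simp [this]
  | succ M ih =>
    rcases Nat.lt_or_ge N (M + 1) with h' | h'
    · exact (ih (by omega)).trans ⟨digRep n M, (streamN_succ n M).symm⟩
    · have : N = M + 1 := by omega
      simp [this]

lemma getD_streamN (n N i : Nat) (h : i < (streamN n N).length) :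
    (streamN n N).getD i '?' = chS n i := by
  have h2 : i < (streamN n (i + 1)).length := by
    have := le_length_streamN n (i + 1); omega
  rcases Nat.le_total N (i + 1) with hle | hle
  · have hp := streamN_prefix n hle
    rw [chS, List.getD_eq_getElem _ _ h, List.getD_eq_getElem _ _ h2]
    exact (List.IsPrefix.getElem hp h)
  · have hp := streamN_prefix n hle
    rw [chS, List.getD_eq_getElem _ _ h, List.getD_eq_getElem _ _ h2]
    exact (List.IsPrefix.getElem hp h2).symm

-- repLoop / repB compute digRep
lemma repLoop_nonpos (n : Int) (fuel : Nat) (num : Int) (out : List Char)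
    (h : num ≤ 0) : repLoop n fuel num out = out := by
  cases fuel with
  | zero => rfl
  | succ f => rw [repLoop]; simp; omega

lemma repLoop_eq (nN : Nat) (hn : 2 ≤ nN) :
    ∀ (fuel : Nat) (x : Nat) (out : List Char), 0 < x → x ≤ fuel →
      repLoop (nN : Int) fuel (x : Int) out = digRep nN x ++ out := by
  intro fuel
  induction fuel with
  | zero => intro x out hx hf; omega
  | succ f ih =>
    intro x out hx hf
    rw [repLoop]
    have hgt : (x : Int) > 0 := by exact_mod_cast hx
    rw [if_pos hgt, PySem.Int.floordiv_natCast x nN, PySem.Int.mod_natCast x nN,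
        PySem.List.pyGetD_natCast]
    rcases Nat.lt_or_ge x nN with hlt | hge
    · have hd : x / nN = 0 := Nat.div_eq_of_lt hlt
      rw [hd, repLoop_nonpos _ _ _ _ (by simp), digRep,
          dif_neg (by omega : ¬ nN ≤ 1), dif_pos hlt]
      simp [Nat.mod_eq_of_lt hlt, dchar]
    · have h1 : 0 < x / nN := Nat.div_pos hge (by omega)
      have h2 : x / nN ≤ f := by
        have := Nat.div_lt_self (by omega : 0 < x) (by omega : 1 < nN)
        omega
      rw [ih _ _ h1 h2]
      conv_rhs => rw [digRep, dif_neg (by omega : ¬ nN ≤ 1), dif_neg (by omega : ¬ x < nN)]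
      simp [dchar]

lemma repB_eq (nN : Nat) (hn : 2 ≤ nN) (num : Int) (h : 0 ≤ num) :
    repB (nN : Int) num = digRep nN num.toNat := by
  rw [repB]
  by_cases hz : num = 0
  · subst hz
    rw [if_pos rfl]
    rw [show (0:Int).toNat = 0 from rfl, digRep, dif_neg (by omega : ¬ nN ≤ 1),
        dif_pos (by omega : 0 < nN)]
    simp [dchar, bDigits]
  · rw [if_neg hz]
    have hx : 0 < num.toNat := by omega
    have hcast : num = (num.toNat : Int) := by omega
    have hfa : num.natAbs = num.toNat := by omega
    rw [hfa]
    conv_lhs => rw [hcast]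
    simp only [Int.toNat_natCast]
    rw [repLoop_eq nN hn (num.toNat + 1) num.toNat [] hx (by omega)]
    simp

-- exA / notationA compute single-character tokens of digRep
lemma exA_eq (r : Int) (h0 : 0 ≤ r) (h16 : r < 16) :
    exA r = String.ofList [dchar r.toNat] := by
  interval_cases r <;> decide

lemma notationLoop_eq (nN : Nat) (hn : 2 ≤ nN) (hn16 : nN ≤ 16) :
    ∀ (fuel : Nat) (q : Nat) (temp : List String), q ≤ fuel →
      notationLoop (nN : Int) fuel (q : Int) temp =
        temp ++ (if q = 0 then [] else
          (digRep nN q).reverse.map (fun c => String.ofList [c])) := by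
  intro fuel
  induction fuel with
  | zero =>
    intro q temp hf
    have : q = 0 := by omega
    subst this
    simp [notationLoop]
  | succ f ih =>
    intro q temp hf
    rw [notationLoop]
    by_cases hq : q = 0
    · subst hq; simp
    · have hgt : (q : Int) > 0 := by exact_mod_cast Nat.pos_of_ne_zero hq
      rw [if_pos hgt, PySem.Int.floordiv_natCast q nN, PySem.Int.mod_natCast q nN]
      have hmodlt : q % nN < nN := Nat.mod_lt _ (by omega)
      rw [exA_eq _ (by positivity) (by exact_mod_cast (by omega : q % nN < 16))]
      have h2 : q / nN ≤ f := by
        have := Nat.div_lt_self (Nat.pos_of_ne_zero hq) (by omega : 1 < nN)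
        omega
      rw [ih (q / nN) _ h2]
      rcases Nat.lt_or_ge q nN with hlt | hge
      · have hd : q / nN = 0 := Nat.div_eq_of_lt hlt
        rw [hd]
        conv_rhs => rw [digRep, dif_neg (by omega : ¬ nN ≤ 1), dif_pos hlt]
        simp [Nat.mod_eq_of_lt hlt, hq]
      · have hd : q / nN ≠ 0 := by
          have := Nat.div_pos hge (by omega : 0 < nN); omega
        conv_rhs => rw [digRep, dif_neg (by omega : ¬ nN ≤ 1), dif_neg (by omega : ¬ q < nN)]
        simp [hq, hd, show ((q:Int) % (nN:Int)).toNat = q % nN by omega]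

lemma notationA_eq (nN : Nat) (hn : 2 ≤ nN) (hn16 : nN ≤ 16) (num : Int) (h : 0 ≤ num) :
    notationA num (nN : Int) =
      (digRep nN num.toNat).reverse.map (fun c => String.ofList [c]) := by
  rw [notationA]
  have hcast : num = (num.toNat : Int) := by omega
  have hfa : num.natAbs = num.toNat := by omega
  set x := num.toNat with hx
  rw [hfa]
  conv_lhs => rw [hcast]
  rw [PySem.Int.floordiv_natCast x nN, PySem.Int.mod_natCast x nN]
  have hmodlt : x % nN < nN := Nat.mod_lt _ (by omega)
  rw [exA_eq _ (by positivity) (by exact_mod_cast (by omega : x % nN < 16))]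
  rw [notationLoop_eq nN hn hn16 (x + 1) (x / nN) _ (by
    have := Nat.div_le_self x nN; omega)]
  rcases Nat.lt_or_ge x nN with hlt | hge
  · have hd : x / nN = 0 := Nat.div_eq_of_lt hlt
    rw [hd]
    conv_rhs => rw [digRep, dif_neg (by omega : ¬ nN ≤ 1), dif_pos hlt]
    simp [Nat.mod_eq_of_lt hlt]
  · have hd : x / nN ≠ 0 := by
      have := Nat.div_pos hge (by omega : 0 < nN); omega
    conv_rhs => rw [digRep, dif_neg (by omega : ¬ nN ≤ 1), dif_neg (by omega : ¬ x < nN)]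
    simp [hd, show ((x:Int) % (nN:Int)).toNat = x % nN by omega]

-- the A loop produces the directly indexed characters
lemma loopA_correct (nN mN pN tN : Nat) (hn : 2 ≤ nN) (hn16 : nN ≤ 16)
    (hm : 1 ≤ mN) (hp : pN < mN) (ht : 1 ≤ tN) :
    ∀ (fuel k c u : Nat),
      c ≤ (streamN nN u).length →
      c ≤ pN + mN * k → pN + mN * k < c + mN →
      k ≤ tN →
      pN + mN * (tN - 1) + 1 ≤ fuel + c →
      loopA (nN : Int) (tN : Int) (mN : Int) (pN : Int) fuel
          ((List.range k).map (fun j => chS nN (pN + mN * j))) (u : Int)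
          (((streamN nN u).drop c).reverse.map (fun ch => String.ofList [ch])) (c : Int)
        = (List.range tN).map (fun j => chS nN (pN + mN * j)) := by
  intro fuel
  induction fuel with
  | zero =>
    intro k c u hcl hc1 hc2 hk hf
    have hk' : k = tN := by
      have h1 : mN * (tN - 1) < mN * k := by omega
      have h2 : tN - 1 < k := Nat.lt_of_mul_lt_mul_left h1
      omega
    subst hk'
    rfl
  | succ f ih =>
    intro k c u hcl hc1 hc2 hk hf
    rw [loopA]
    have hlen : (((List.range k).map (fun j => chS nN (pN + mN * j))).length : Int)
        = (k : Int) := by simp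
    by_cases hkt : k = tN
    · rw [if_neg (by rw [hlen]; exact_mod_cast (by omega : ¬ k < tN))]
      rw [hkt]
    · have hklt : k < tN := by omega
      rw [if_pos (by rw [hlen]; exact_mod_cast hklt)]
      -- after the possible refill, ba corresponds to position c of streamN nN u'
      have hexists :
          ∃ u' : Nat, u ≤ u' ∧
            ((if ((streamN nN u).drop c).reverse.map (fun ch => String.ofList [ch]) = []
                then (notationA (u : Int) (nN : Int), (u : Int) + 1)
                else (((streamN nN u).drop c).reverse.map (fun ch => String.ofList [ch]),
                      (u : Int))).1
              = ((streamN nN u').drop c).reverse.map (fun ch => String.ofList [ch])) ∧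
            c < (streamN nN u').length ∧
            ((if ((streamN nN u).drop c).reverse.map (fun ch => String.ofList [ch]) = []
                then (notationA (u : Int) (nN : Int), (u : Int) + 1)
                else (((streamN nN u).drop c).reverse.map (fun ch => String.ofList [ch]),
                      (u : Int))).2
              = (u' : Int)) := by
        by_cases hba : ((streamN nN u).drop c).reverse.map
            (fun ch => String.ofList [ch]) = []
        · have hdc : (streamN nN u).drop c = [] := by
            have h1 := List.map_eq_nil_iff.mp hba
            exact List.reverse_eq_nil_iff.mp h1
          have hceq : c = (streamN nN u).length := by
            have := List.drop_eq_nil_iff.mp hdc; omega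
          refine ⟨u + 1, by omega, ?_, ?_, ?_⟩
          · rw [if_pos hba]
            rw [notationA_eq nN hn hn16 (u : Int) (by positivity)]
            rw [streamN_succ, Int.toNat_natCast, hceq, List.drop_left]
          · rw [streamN_succ]
            have := List.length_pos_iff.mpr (digRep_ne_nil nN u)
            simp only [List.length_append]; omega
          · rw [if_pos hba]; push_cast; ring
        · refine ⟨u, le_refl u, by rw [if_neg hba], ?_, by rw [if_neg hba]⟩
          by_contra hge
          have hnil : (streamN nN u).drop c = [] := List.drop_eq_nil_iff.mpr (by omega)
          exact hba (by rw [hnil]; rfl)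
      obtain ⟨u', hu'ge, hdrop, hclt, hnum⟩ := hexists
      simp only [hdrop, hnum]
      rw [List.drop_eq_getElem_cons hclt]
      set head := (streamN nN u')[c] with hhead
      have hpop : PySem.List.pop?
          ((head :: (streamN nN u').drop (c + 1)).reverse.map
            (fun ch => String.ofList [ch])) (-1)
          = some (String.ofList [head],
              ((streamN nN u').drop (c + 1)).reverse.map (fun ch => String.ofList [ch])) := by
        simp only [List.reverse_cons, List.map_append, List.map_cons, List.map_nil]
        exact PySem.List.pop?_last _ _
      rw [hpop]
      have hmodc : PySem.Int.mod (c : Int) (mN : Int) = ((c % mN : Nat) : Int) :=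
        PySem.Int.mod_natCast c mN
      simp only [hmodc]
      have hheadc : head = chS nN c := by
        rw [hhead, ← List.getD_eq_getElem _ '?' hclt, getD_streamN _ _ _ hclt]
      have hcast1 : ((c : Int) + 1) = (((c + 1 : Nat)) : Int) := by push_cast; ring
      by_cases hsel : c % mN = pN
      · rw [if_pos (by exact_mod_cast hsel : ((c % mN : Nat) : Int) = (pN : Int))]
        have hceq : c = pN + mN * k := by
          have e : mN * (c / mN) + c % mN = c := Nat.div_add_mod c mN
          rw [hsel] at e
          rcases Nat.lt_trichotomy (c / mN) k with h' | h' | h'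
          · have h1 : mN * (c / mN + 1) ≤ mN * k :=
              Nat.mul_le_mul_left mN (Nat.succ_le_of_lt h')
            have h2 : mN * (c / mN + 1) = mN * (c / mN) + mN := by ring
            linarith
          · rw [h'] at e; linarith
          · have h1 : mN * (k + 1) ≤ mN * (c / mN) :=
              Nat.mul_le_mul_left mN (Nat.succ_le_of_lt h')
            have h2 : mN * (k + 1) = mN * k + mN := by ring
            linarith
        have hmul : mN * (k + 1) = mN * k + mN := by ring
        have hans : (List.range k).map (fun j => chS nN (pN + mN * j))
              ++ (String.ofList [head]).toList
            = (List.range (k + 1)).map (fun j => chS nN (pN + mN * j)) := by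
          rw [String.toList_ofList, hheadc, hceq, List.range_succ]; simp
        rw [hans, hcast1]
        exact ih (k + 1) (c + 1) u' (by omega) (by rw [hmul]; linarith)
          (by rw [hmul]; linarith) (by omega) (by linarith)
      · rw [if_neg (fun h => hsel (by exact_mod_cast h))]
        have hne : c ≠ pN + mN * k := by
          intro he
          exact hsel (by rw [he, Nat.add_mul_mod_self_left, Nat.mod_eq_of_lt hp])
        rw [hcast1]
        exact ih k (c + 1) u' (by omega) (Nat.lt_of_le_of_ne hc1 hne)
          (lt_of_lt_of_le hc2 (by omega)) hk (by linarith)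

-- the B build loop produces a long-enough stream prefix
lemma buildB_correct (nN : Nat) (hn : 2 ≤ nN) (need : Int) :
    ∀ (fuel : Nat) (u : Nat) (total : Int),
      total = ((streamN nN u).length : Int) →
      (need - total).toNat ≤ fuel →
      ∃ U : Nat, buildB (nN : Int) need fuel ((List.range u).map (digRep nN)) total (u : Int)
          = (List.range U).map (digRep nN) ∧ need ≤ ((streamN nN U).length : Int) := by
  intro fuel
  induction fuel with
  | zero =>
    intro u total htot hf
    exact ⟨u, rfl, by omega⟩
  | succ f ih =>
    intro u total htot hf
    rw [buildB]
    by_cases hlt : total < need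
    · rw [if_pos hlt]
      have hrep : repB (nN : Int) (u : Int) = digRep nN u := by
        rw [repB_eq nN hn (u : Int) (by positivity), Int.toNat_natCast]
      have hpos : 1 ≤ (digRep nN u).length :=
        List.length_pos_iff.mpr (digRep_ne_nil nN u)
      have hlenS : ((streamN nN (u + 1)).length : Int)
          = total + ((digRep nN u).length : Int) := by
        rw [streamN_succ, htot]; push_cast [List.length_append]; ring
      have hparts : (List.range u).map (digRep nN) ++ [digRep nN u]
          = (List.range (u + 1)).map (digRep nN) := by
        rw [List.range_succ]; simp
      have hcast : ((u : Int) + 1) = (((u + 1 : Nat)) : Int) := by push_cast; ring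
      simp only [hrep]
      rw [hparts, hcast]
      exact ih (u + 1) (total + ((digRep nN u).length : Int)) hlenS.symm (by omega)
    · rw [if_neg hlt]
      exact ⟨u, rfl, by omega⟩

theorem solution_spec : Claim_equal_solution := by
  unfold Claim_equal_solution
  intro n t m p _ hpre
  unfold Spec_solution
  by_cases ht : t ≤ 0
  · rw [solution, solution_alt, if_pos ht, loopA,
        if_neg (by simpa using ht : ¬ ((([] : List Char).length : Int) < t))]
  · rcases hpre with h | ⟨hn2, hn16, hm1, hp1, hpm⟩
    · omega
    set nN := n.toNat with hnN_def
    set mN := m.toNat with hmN_def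
    set tN := t.toNat with htN_def
    set pN := (p - 1).toNat with hpN_def
    have hn : n = (nN : Int) := by omega
    have hm : m = (mN : Int) := by omega
    have htc : t = (tN : Int) := by omega
    have hpc : p - 1 = (pN : Int) := by omega
    have hnN : 2 ≤ nN := by omega
    have hnN16 : nN ≤ 16 := by omega
    have hmN : 1 ≤ mN := by omega
    have hpN : pN < mN := by omega
    have htN : 1 ≤ tN := by omega
    have hmulsub : mN * (tN - 1) + mN = mN * tN := by
      have h1 : tN - 1 + 1 = tN := by omega
      calc mN * (tN - 1) + mN = mN * (tN - 1 + 1) := by ring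
        _ = mN * tN := by rw [h1]
    have hA : solution n t m p
        = String.ofList ((List.range tN).map (fun j => chS nN (pN + mN * j))) := by
      rw [solution, hn, hm, htc, hpc]
      have hfuel : (((tN : Int)) * ((mN : Int))).natAbs + 1 = tN * mN + 1 := by
        rw [← Nat.cast_mul, Int.natAbs_natCast]
      rw [hfuel]
      have := loopA_correct nN mN pN tN hnN hnN16 hmN hpN htN (tN * mN + 1) 0 0 0
        (by simp) (by simp) (by simpa using hpN) (by omega)
        (by
          have h2 : mN * tN = tN * mN := Nat.mul_comm mN tN
          linarith)
      simpa [streamN] using congrArg String.ofList this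
    have hB : solution_alt n t m p
        = String.ofList ((List.range tN).map (fun j => chS nN (pN + mN * j))) := by
      rw [solution_alt, hn, hm, htc, hpc]
      rw [if_neg (by omega : ¬ ((tN : Int) ≤ 0))]
      have hneed : ((pN : Int)) + (((tN : Int)) - 1) * ((mN : Int)) + 1
          = ((pN + mN * (tN - 1) + 1 : Nat) : Int) := by
        push_cast [Nat.cast_sub htN]
        ring
      simp only [hneed]
      set needN := pN + mN * (tN - 1) + 1 with hneedN
      obtain ⟨U, hU, hlenU⟩ := buildB_correct nN hnN ((needN : Int))
        ((needN : Int).natAbs + 1) 0 0 (by simp [streamN]) (by simp)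
      simp only [List.range_zero, List.map_nil, Nat.cast_zero] at hU
      rw [hU]
      have hlenU' : needN ≤ (streamN nN U).length := by exact_mod_cast hlenU
      have hflat : ((List.range U).map (digRep nN)).flatten = streamN nN U := by
        rw [streamN, List.flatMap_def]
      rw [hflat]
      congr 1
      rw [PySem.List.pyRange_one]
      have htn0 : ((tN : Int) - 0).toNat = tN := by omega
      rw [htn0, List.map_map]
      refine List.map_congr_left (fun k hk => ?_)
      have hklt : k < tN := List.mem_range.mp hk
      have hidx : ((pN : Int)) + (0 + (k : Int)) * ((mN : Int))
          = ((pN + mN * k : Nat) : Int) := by push_cast; ring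
      simp only [Function.comp_apply, hidx]
      rw [PySem.List.pyGetD_natCast]
      have hlt : pN + mN * k < (streamN nN U).length := by
        have h1 : mN * k ≤ mN * (tN - 1) := Nat.mul_le_mul_left mN (by omega)
        omega
      rw [List.getD_eq_getElem _ '?' hlt, ← List.getD_eq_getElem _ '?' hlt,
          getD_streamN _ _ _ hlt]
    rw [hA, hB]
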